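-- pv_equiv track=rewrite | github.com/aws-samples/sample-lambda-test-event-generator | utils/code_chunker.py | _categorize_function_by_name
-- ===== SOURCE A (Python) =====
-- def _categorize_function_by_name(name: str, language: str) -> str:
--     """Categorize function by its name and language conventions."""
--     name_lower = name.lower()
--
--     # Common patterns across languages
--     if any(word in name_lower for word in ['handler', 'lambda_handler', 'main']):
--         return f"Main {language} Lambda handler function"
--     elif any(word in name_lower for word in ['validate', 'check', 'verify', 'is_valid']):
--         return f"{language.title()} validation function"
--     elif any(word in name_lower for word in ['process', 'transform', 'convert', 'parse']):
--         return f"{language.title()} processing function"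
--     elif any(word in name_lower for word in ['auth', 'login', 'token', 'authenticate']):
--         return f"{language.title()} authentication function"
--     elif any(word in name_lower for word in ['get', 'fetch', 'retrieve', 'read', 'find']):
--         return f"{language.title()} data retrieval function"
--     elif any(word in name_lower for word in ['save', 'store', 'create', 'insert', 'write', 'add']):
--         return f"{language.title()} data storage function"
--     elif any(word in name_lower for word in ['update', 'modify', 'edit', 'change']):
--         return f"{language.title()} data modification function"
--     elif any(word in name_lower for word in ['delete', 'remove', 'destroy', 'drop']):
--         return f"{language.title()} data deletion function"
--     else:
--         return f"{language.title()} function: {name}"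
-- ===== SOURCE B (Python) =====
-- _GROUPS = [
--     ['handler', 'lambda_handler', 'main'],
--     ['validate', 'check', 'verify', 'is_valid'],
--     ['process', 'transform', 'convert', 'parse'],
--     ['auth', 'login', 'token', 'authenticate'],
--     ['get', 'fetch', 'retrieve', 'read', 'find'],
--     ['save', 'store', 'create', 'insert', 'write', 'add'],
--     ['update', 'modify', 'edit', 'change'],
--     ['delete', 'remove', 'destroy', 'drop'],
-- ]
--
-- # flat keyword -> group-priority index
-- _KEYWORDS = [(w, i) for i, ws in enumerate(_GROUPS) for w in ws]
--
-- _SUFFIXES = [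
--     " validation function",
--     " processing function",
--     " authentication function",
--     " data retrieval function",
--     " data storage function",
--     " data modification function",
--     " data deletion function",
-- ]
--
--
-- def _categorize_function_by_name(name: str, language: str) -> str:
--     """Categorize a function name: scan the name once position by position,
--     recording the best (smallest) priority of any keyword starting there."""
--     nl = name.lower()
--     best = min((gi for pos in range(len(nl)) for (w, gi) in _KEYWORDS
--                 if nl.startswith(w, pos)), default=len(_GROUPS))
--     if best == 0:
--         return f"Main {language} Lambda handler function"
--     if best == len(_GROUPS):
--         return f"{language.title()} function: {name}"
--     return language.title() + _SUFFIXES[best - 1]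
-- ===== Notes on version B (the rewrite author's own statement) =====
-- stated objective: alternative
-- what changed: Instead of eight chained any(keyword in name) containment passes, B inverts the search: it scans the lowercased name once position by position, looks up which keywords start at each position, and keeps the minimum group priority, mapping that priority to the result template at the end.
import Mathlib
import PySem

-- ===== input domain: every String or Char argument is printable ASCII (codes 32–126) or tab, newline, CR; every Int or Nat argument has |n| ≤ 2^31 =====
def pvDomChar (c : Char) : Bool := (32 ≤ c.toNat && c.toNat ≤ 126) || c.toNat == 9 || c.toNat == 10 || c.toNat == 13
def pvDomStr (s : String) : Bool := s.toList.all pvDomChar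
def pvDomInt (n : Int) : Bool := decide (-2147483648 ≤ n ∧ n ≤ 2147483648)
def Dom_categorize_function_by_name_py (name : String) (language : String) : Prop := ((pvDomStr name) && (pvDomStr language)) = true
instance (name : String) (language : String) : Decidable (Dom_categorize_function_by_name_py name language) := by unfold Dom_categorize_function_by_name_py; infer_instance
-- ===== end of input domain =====

-- B replaces A's eight chained any-keyword-in-name containment passes by a single positional
-- scan of the lowercased name that takes the minimum priority of any keyword starting at any
-- position (objective: alternative); same results on all inputs.

-- str.title(), ported by hand: exact on the ASCII domain (ASCII cased characters = letters).
def pyTitleGo : Bool → List Char → List Char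
  | _, [] => []
  | prev, c :: rest =>
    let cased := PySem.Chars.isalpha c
    let c' := if cased then (if prev then PySem.Chars.lowerChar c else PySem.Chars.upperChar c) else c
    c' :: pyTitleGo cased rest

def pyTitle (s : String) : String := String.ofList (pyTitleGo false s.toList)

-- ===== PORT A =====
def categorize_function_by_name_py (name : String) (language : String) : String :=
  let name_lower := PySem.Str.lower name
  if ["handler", "lambda_handler", "main"].any (fun w => PySem.Str.isIn w name_lower) then
    String.ofList ("Main ".toList ++ language.toList ++ " Lambda handler function".toList)
  else if ["validate", "check", "verify", "is_valid"].any (fun w => PySem.Str.isIn w name_lower) then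
    String.ofList ((pyTitle language).toList ++ " validation function".toList)
  else if ["process", "transform", "convert", "parse"].any (fun w => PySem.Str.isIn w name_lower) then
    String.ofList ((pyTitle language).toList ++ " processing function".toList)
  else if ["auth", "login", "token", "authenticate"].any (fun w => PySem.Str.isIn w name_lower) then
    String.ofList ((pyTitle language).toList ++ " authentication function".toList)
  else if ["get", "fetch", "retrieve", "read", "find"].any (fun w => PySem.Str.isIn w name_lower) then
    String.ofList ((pyTitle language).toList ++ " data retrieval function".toList)
  else if ["save", "store", "create", "insert", "write", "add"].any (fun w => PySem.Str.isIn w name_lower) then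
    String.ofList ((pyTitle language).toList ++ " data storage function".toList)
  else if ["update", "modify", "edit", "change"].any (fun w => PySem.Str.isIn w name_lower) then
    String.ofList ((pyTitle language).toList ++ " data modification function".toList)
  else if ["delete", "remove", "destroy", "drop"].any (fun w => PySem.Str.isIn w name_lower) then
    String.ofList ((pyTitle language).toList ++ " data deletion function".toList)
  else
    String.ofList ((pyTitle language).toList ++ " function: ".toList ++ name.toList)

-- ===== PORT B =====
def pvGroups : List (List String) :=
  [ ["handler", "lambda_handler", "main"],
    ["validate", "check", "verify", "is_valid"],
    ["process", "transform", "convert", "parse"],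
    ["auth", "login", "token", "authenticate"],
    ["get", "fetch", "retrieve", "read", "find"],
    ["save", "store", "create", "insert", "write", "add"],
    ["update", "modify", "edit", "change"],
    ["delete", "remove", "destroy", "drop"] ]

-- _KEYWORDS = [(w, i) for i, ws in enumerate(_GROUPS) for w in ws]
def pvKeywords : List (String × Int) :=
  (PySem.List.enumerate pvGroups 0).flatMap (fun p => p.2.map (fun w => (w, p.1)))

def pvSuffixes : List String :=
  [ " validation function", " processing function", " authentication function",
    " data retrieval function", " data storage function", " data modification function",
    " data deletion function" ]

-- min(generator, default=8): fold over positions (outer) and keywords (inner) keeping the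
-- running minimum; nl.startswith(w, pos) is startswith on the suffix nl[pos:] (pos ≥ 0 here).
def pvBest (nl : List Char) : Int :=
  (List.range nl.length).foldl
    (fun best pos =>
      pvKeywords.foldl
        (fun b wk => if PySem.Chars.startswith (nl.drop pos) wk.1.toList then min b wk.2 else b)
        best)
    8

def categorize_function_by_name_py_alt (name : String) (language : String) : String :=
  let nl := (PySem.Str.lower name).toList
  let best := pvBest nl
  if best == 0 then
    String.ofList ("Main ".toList ++ language.toList ++ " Lambda handler function".toList)
  else if best == 8 then
    String.ofList ((pyTitle language).toList ++ " function: ".toList ++ name.toList)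
  else
    -- _SUFFIXES[best - 1]; best ∈ [1,7] here, so the pyGet? is some (getD "" only makes it total)
    String.ofList ((pyTitle language).toList ++ ((PySem.List.pyGet? pvSuffixes (best - 1)).getD "").toList)

-- ===== PRECONDITION & SPEC =====
def Spec_categorize_function_by_name_py (name : String) (language : String) (out : String) : Prop := out = categorize_function_by_name_py_alt name language
instance (name : String) (language : String) (out : String) : Decidable (Spec_categorize_function_by_name_py name language out) := by unfold Spec_categorize_function_by_name_py; infer_instance

-- ===== CLAIM (what is proved, stated in full; the proofs are below) =====
def Claim_equal_categorize_function_by_name_py : Prop := ∀ (name : String) (language : String), Dom_categorize_function_by_name_py name language → Spec_categorize_function_by_name_py name language (categorize_function_by_name_py name language)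

-- ===== LEMMAS AND PROOFS =====

-- the multiset of priorities hit during B's scan
def pvHits (nl : List Char) : List Int :=
  (List.range nl.length).flatMap (fun pos =>
    pvKeywords.filterMap (fun wk =>
      if PySem.Chars.startswith (nl.drop pos) wk.1.toList then some wk.2 else none))

theorem pv_foldl_min_filterMap (ys : List (String × Int)) (p : String × Int → Bool) (b : Int) :
    ys.foldl (fun b wk => if p wk then min b wk.2 else b) b
      = (ys.filterMap (fun wk => if p wk then some wk.2 else none)).foldl min b := by
  induction ys generalizing b with
  | nil => rfl
  | cons y ys ih =>
    simp only [List.foldl_cons, List.filterMap_cons]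
    by_cases h : p y <;> simp [h, ih]

theorem pvBest_eq_hits (nl : List Char) : pvBest nl = (pvHits nl).foldl min 8 := by
  unfold pvBest pvHits
  generalize List.range nl.length = xs
  generalize (8 : Int) = b
  induction xs generalizing b with
  | nil => rfl
  | cons x xs ih =>
    simp only [List.foldl_cons, List.flatMap_cons, List.foldl_append]
    rw [pv_foldl_min_filterMap, ih]

theorem pv_foldl_min_init_le (l : List Int) (b : Int) : l.foldl min b ≤ b := by
  induction l generalizing b with
  | nil => simp
  | cons y ys ih => exact le_trans (ih (min b y)) (min_le_left _ _)

theorem pv_foldl_min_le (l : List Int) (b : Int) : ∀ x ∈ l, l.foldl min b ≤ x := by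
  induction l generalizing b with
  | nil => simp
  | cons y ys ih =>
    intro x hx
    simp only [List.mem_cons] at hx
    rcases hx with rfl | hx
    · exact le_trans (pv_foldl_min_init_le ys (min b x)) (min_le_right _ _)
    · exact ih _ x hx

theorem pv_foldl_min_mem (l : List Int) (b : Int) : l.foldl min b = b ∨ l.foldl min b ∈ l := by
  induction l generalizing b with
  | nil => simp
  | cons y ys ih =>
    simp only [List.foldl_cons, List.mem_cons]
    rcases ih (min b y) with h | h
    · rcases min_cases b y with ⟨he, _⟩ | ⟨he, _⟩
      · exact Or.inl (h.trans he)
      · exact Or.inr (Or.inl (h.trans he))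
    · exact Or.inr (Or.inr h)

-- membership in the hit list, unfolded over the literal keyword table
theorem pv_mem_hits (nl : List Char) (x : Int) :
    x ∈ pvHits nl ↔ ∃ pos < nl.length, ∃ wk ∈ pvKeywords,
        PySem.Chars.startswith (nl.drop pos) wk.1.toList = true ∧ wk.2 = x := by
  unfold pvHits
  simp only [List.mem_flatMap, List.mem_range, List.mem_filterMap]
  constructor
  · rintro ⟨pos, hpos, wk, hwk, h⟩
    by_cases hs : PySem.Chars.startswith (nl.drop pos) wk.1.toList
    · simp only [hs, if_pos, Option.some.injEq] at h
      exact ⟨pos, hpos, wk, hwk, hs, h⟩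
    · simp [hs] at h
  · rintro ⟨pos, hpos, wk, hwk, hs, hx⟩
    exact ⟨pos, hpos, wk, hwk, by simp [hs, hx]⟩

-- a single keyword: some position of nl starts with w  ↔  w in nl (w nonempty)
theorem pv_exists_pos_iff_isIn (nl w : List Char) (hw : w ≠ []) :
    (∃ pos < nl.length, w <+: nl.drop pos) ↔ PySem.Chars.isIn w nl = true := by
  rw [← PySem.Chars.exists_prefix_drop_iff_isIn]
  constructor
  · rintro ⟨pos, _, h⟩; exact ⟨pos, h⟩
  · rintro ⟨j, h⟩
    by_cases hj : j < nl.length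
    · exact ⟨j, hj, h⟩
    · exfalso
      rw [List.drop_eq_nil_of_le (by omega)] at h
      exact hw (List.prefix_nil.mp h)

-- the per-group condition A tests, on the list side
def pvCond (nl : List Char) (ws : List String) : Bool :=
  ws.any (fun w => PySem.Chars.isIn w.toList nl)

set_option maxHeartbeats 1000000 in
theorem pv_kw_nonempty : ∀ p ∈ pvKeywords, p.1.toList ≠ [] := by decide

theorem pv_mem_hits_iff (nl : List Char) (x : Int) :
    x ∈ pvHits nl ↔ ∃ (i : Nat), ∃ h : i < pvGroups.length,
        pvCond nl pvGroups[i] = true ∧ x = (i : Int) := by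
  rw [pv_mem_hits]
  constructor
  · rintro ⟨pos, hpos, wk, hwk, hs, hx⟩
    have hwne := pv_kw_nonempty wk hwk
    unfold pvKeywords at hwk
    simp only [List.mem_flatMap, PySem.List.mem_enumerate_iff] at hwk
    obtain ⟨p, ⟨k, hk, rfl⟩, hw⟩ := hwk
    simp only [List.mem_map] at hw
    obtain ⟨w, hwmem, rfl⟩ := hw
    refine ⟨k, hk, ?_, by simpa using hx.symm⟩
    unfold pvCond
    rw [List.any_eq_true]
    refine ⟨w, hwmem, ?_⟩
    rw [← pv_exists_pos_iff_isIn _ _ hwne]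
    exact ⟨pos, hpos, (PySem.Chars.startswith_iff _ _).mp hs⟩
  · rintro ⟨i, hi, hc, rfl⟩
    unfold pvCond at hc
    rw [List.any_eq_true] at hc
    obtain ⟨w, hwmem, hin⟩ := hc
    have hmemkw : (w, (i : Int)) ∈ pvKeywords := by
      unfold pvKeywords
      simp only [List.mem_flatMap, PySem.List.mem_enumerate_iff]
      exact ⟨((i : Int), pvGroups[i]), ⟨i, hi, by simp⟩, List.mem_map.mpr ⟨w, hwmem, rfl⟩⟩
    have hwne : w.toList ≠ [] := pv_kw_nonempty _ hmemkw
    rw [← pv_exists_pos_iff_isIn _ _ hwne] at hin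
    obtain ⟨pos, hpos, hpre⟩ := hin
    exact ⟨pos, hpos, (w, (i : Int)), hmemkw, (PySem.Chars.startswith_iff _ _).mpr hpre, rfl⟩

-- pvBest as the first-match nested conditional over the eight group conditions
theorem pvBest_spec (nl : List Char) :
    pvBest nl =
      (if pvCond nl ["handler", "lambda_handler", "main"] then 0
       else if pvCond nl ["validate", "check", "verify", "is_valid"] then 1
       else if pvCond nl ["process", "transform", "convert", "parse"] then 2
       else if pvCond nl ["auth", "login", "token", "authenticate"] then 3
       else if pvCond nl ["get", "fetch", "retrieve", "read", "find"] then 4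
       else if pvCond nl ["save", "store", "create", "insert", "write", "add"] then 5
       else if pvCond nl ["update", "modify", "edit", "change"] then 6
       else if pvCond nl ["delete", "remove", "destroy", "drop"] then 7
       else 8) := by
  rw [pvBest_eq_hits]
  set m := (pvHits nl).foldl min 8 with hm
  have hle : ∀ x ∈ pvHits nl, m ≤ x := pv_foldl_min_le _ _
  have hmem : m = 8 ∨ m ∈ pvHits nl := pv_foldl_min_mem _ _
  have hchar : ∀ x : Int, x ∈ pvHits nl ↔ ∃ (i : Nat), ∃ h : i < pvGroups.length,
      pvCond nl pvGroups[i] = true ∧ x = (i : Int) := fun x => pv_mem_hits_iff nl x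
  have hlei : ∀ (i : Nat) (h : i < pvGroups.length), pvCond nl pvGroups[i] = true → m ≤ (i : Int) := by
    intro i h hc
    exact hle _ ((hchar _).mpr ⟨i, h, hc, rfl⟩)
  split_ifs with h0 h1 h2 h3 h4 h5 h6 h7
  · have hub : m ≤ (((0 : Nat)) : Int) := hlei 0 (by norm_num [pvGroups]) (by exact h0)
    refine le_antisymm (by simpa using hub) ?_
    rcases hmem with he | hm'
    · rw [he]; norm_num
    · obtain ⟨i, hi, hc, heq⟩ := (hchar _).mp hm'
      rw [heq]
      have hi8 : i < 8 := by simpa [pvGroups] using hi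
      interval_cases i
      all_goals omega
  · have hub : m ≤ (((1 : Nat)) : Int) := hlei 1 (by norm_num [pvGroups]) (by exact h1)
    refine le_antisymm (by simpa using hub) ?_
    rcases hmem with he | hm'
    · rw [he]; norm_num
    · obtain ⟨i, hi, hc, heq⟩ := (hchar _).mp hm'
      rw [heq]
      have hi8 : i < 8 := by simpa [pvGroups] using hi
      interval_cases i
      · exact absurd hc (by exact h0)
      all_goals omega
  · have hub : m ≤ (((2 : Nat)) : Int) := hlei 2 (by norm_num [pvGroups]) (by exact h2)
    refine le_antisymm (by simpa using hub) ?_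
    rcases hmem with he | hm'
    · rw [he]; norm_num
    · obtain ⟨i, hi, hc, heq⟩ := (hchar _).mp hm'
      rw [heq]
      have hi8 : i < 8 := by simpa [pvGroups] using hi
      interval_cases i
      · exact absurd hc (by exact h0)
      · exact absurd hc (by exact h1)
      all_goals omega
  · have hub : m ≤ (((3 : Nat)) : Int) := hlei 3 (by norm_num [pvGroups]) (by exact h3)
    refine le_antisymm (by simpa using hub) ?_
    rcases hmem with he | hm'
    · rw [he]; norm_num
    · obtain ⟨i, hi, hc, heq⟩ := (hchar _).mp hm'
      rw [heq]
      have hi8 : i < 8 := by simpa [pvGroups] using hi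
      interval_cases i
      · exact absurd hc (by exact h0)
      · exact absurd hc (by exact h1)
      · exact absurd hc (by exact h2)
      all_goals omega
  · have hub : m ≤ (((4 : Nat)) : Int) := hlei 4 (by norm_num [pvGroups]) (by exact h4)
    refine le_antisymm (by simpa using hub) ?_
    rcases hmem with he | hm'
    · rw [he]; norm_num
    · obtain ⟨i, hi, hc, heq⟩ := (hchar _).mp hm'
      rw [heq]
      have hi8 : i < 8 := by simpa [pvGroups] using hi
      interval_cases i
      · exact absurd hc (by exact h0)
      · exact absurd hc (by exact h1)
      · exact absurd hc (by exact h2)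
      · exact absurd hc (by exact h3)
      all_goals omega
  · have hub : m ≤ (((5 : Nat)) : Int) := hlei 5 (by norm_num [pvGroups]) (by exact h5)
    refine le_antisymm (by simpa using hub) ?_
    rcases hmem with he | hm'
    · rw [he]; norm_num
    · obtain ⟨i, hi, hc, heq⟩ := (hchar _).mp hm'
      rw [heq]
      have hi8 : i < 8 := by simpa [pvGroups] using hi
      interval_cases i
      · exact absurd hc (by exact h0)
      · exact absurd hc (by exact h1)
      · exact absurd hc (by exact h2)
      · exact absurd hc (by exact h3)
      · exact absurd hc (by exact h4)
      all_goals omega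
  · have hub : m ≤ (((6 : Nat)) : Int) := hlei 6 (by norm_num [pvGroups]) (by exact h6)
    refine le_antisymm (by simpa using hub) ?_
    rcases hmem with he | hm'
    · rw [he]; norm_num
    · obtain ⟨i, hi, hc, heq⟩ := (hchar _).mp hm'
      rw [heq]
      have hi8 : i < 8 := by simpa [pvGroups] using hi
      interval_cases i
      · exact absurd hc (by exact h0)
      · exact absurd hc (by exact h1)
      · exact absurd hc (by exact h2)
      · exact absurd hc (by exact h3)
      · exact absurd hc (by exact h4)
      · exact absurd hc (by exact h5)
      all_goals omega
  · have hub : m ≤ (((7 : Nat)) : Int) := hlei 7 (by norm_num [pvGroups]) (by exact h7)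
    refine le_antisymm (by simpa using hub) ?_
    rcases hmem with he | hm'
    · rw [he]; norm_num
    · obtain ⟨i, hi, hc, heq⟩ := (hchar _).mp hm'
      rw [heq]
      have hi8 : i < 8 := by simpa [pvGroups] using hi
      interval_cases i
      · exact absurd hc (by exact h0)
      · exact absurd hc (by exact h1)
      · exact absurd hc (by exact h2)
      · exact absurd hc (by exact h3)
      · exact absurd hc (by exact h4)
      · exact absurd hc (by exact h5)
      · exact absurd hc (by exact h6)
      all_goals omega
  · rcases hmem with he | hm'
    · exact he
    · exfalso
      obtain ⟨i, hi, hc, heq⟩ := (hchar _).mp hm'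
      have hi8 : i < 8 := by simpa [pvGroups] using hi
      interval_cases i
      · exact absurd hc (by exact h0)
      · exact absurd hc (by exact h1)
      · exact absurd hc (by exact h2)
      · exact absurd hc (by exact h3)
      · exact absurd hc (by exact h4)
      · exact absurd hc (by exact h5)
      · exact absurd hc (by exact h6)
      · exact absurd hc (by exact h7)


-- bridge: A's per-group Bool condition equals pvCond on the lowered list
theorem pv_condA (nl : String) (ws : List String) :
    ws.any (fun w => PySem.Str.isIn w nl) = pvCond nl.toList ws := by
  unfold pvCond
  congr 1

-- ===== VERDICT =====
theorem categorize_function_by_name_py_spec : Claim_equal_categorize_function_by_name_py := by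
  intro name language _
  unfold Spec_categorize_function_by_name_py
  unfold categorize_function_by_name_py categorize_function_by_name_py_alt
  simp only [pv_condA]
  rw [pvBest_spec]
  by_cases h0 : pvCond (PySem.Str.lower name).toList ["handler", "lambda_handler", "main"] = true
  · simp only [h0, if_true]
    try rfl
  · rw [Bool.not_eq_true] at h0
    by_cases h1 : pvCond (PySem.Str.lower name).toList ["validate", "check", "verify", "is_valid"] = true
    · simp only [h0, h1, Bool.false_eq_true, if_true, if_false]
      try rfl
    · rw [Bool.not_eq_true] at h1
      by_cases h2 : pvCond (PySem.Str.lower name).toList ["process", "transform", "convert", "parse"] = true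
      · simp only [h0, h1, h2, Bool.false_eq_true, if_true, if_false]
        try rfl
      · rw [Bool.not_eq_true] at h2
        by_cases h3 : pvCond (PySem.Str.lower name).toList ["auth", "login", "token", "authenticate"] = true
        · simp only [h0, h1, h2, h3, Bool.false_eq_true, if_true, if_false]
          try rfl
        · rw [Bool.not_eq_true] at h3
          by_cases h4 : pvCond (PySem.Str.lower name).toList ["get", "fetch", "retrieve", "read", "find"] = true
          · simp only [h0, h1, h2, h3, h4, Bool.false_eq_true, if_true, if_false]
            try rfl
          · rw [Bool.not_eq_true] at h4
            by_cases h5 : pvCond (PySem.Str.lower name).toList ["save", "store", "create", "insert", "write", "add"] = true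
            · simp only [h0, h1, h2, h3, h4, h5, Bool.false_eq_true, if_true, if_false]
              try rfl
            · rw [Bool.not_eq_true] at h5
              by_cases h6 : pvCond (PySem.Str.lower name).toList ["update", "modify", "edit", "change"] = true
              · simp only [h0, h1, h2, h3, h4, h5, h6, Bool.false_eq_true, if_true, if_false]
                try rfl
              · rw [Bool.not_eq_true] at h6
                by_cases h7 : pvCond (PySem.Str.lower name).toList ["delete", "remove", "destroy", "drop"] = true
                · simp only [h0, h1, h2, h3, h4, h5, h6, h7, Bool.false_eq_true, if_true, if_false]
                  try rfl
                · rw [Bool.not_eq_true] at h7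
                  simp only [h0, h1, h2, h3, h4, h5, h6, h7, Bool.false_eq_true, if_false]
                  try rfl
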